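-- pv_equiv track=rewrite | github.com/AdamZhouSE/pythonHomework | Code/CodeRecords/2117/60788/256299.py | f
-- ===== SOURCE A (Python) =====
-- def f(n):
--     s=[0]*n
--     for i in range(1,n+1):
--         start=-1
--         while start<n-i:
--             start+=i
--             s[start]=1-s[start]
--     return s.count(1)
-- ===== SOURCE B (Python) =====
-- def f(n):
--     # The final state of bulb j is ON iff j+1 has an odd number of divisors,
--     # i.e. iff j+1 is a perfect square; so the answer is the number of
--     # positive k with k*k <= n.
--     k = 1
--     while k * k <= n:
--         k += 1
--     return k - 1
-- ===== Notes on version B (the rewrite author's own statement) =====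
-- stated objective: faster
-- what changed: replaces the O(n log n) bulb-toggling simulation over an n-cell array by directly counting the perfect squares <= n (final bulb j is on iff j+1 is a perfect square), via a simple integer-square-root scan
import Mathlib
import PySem

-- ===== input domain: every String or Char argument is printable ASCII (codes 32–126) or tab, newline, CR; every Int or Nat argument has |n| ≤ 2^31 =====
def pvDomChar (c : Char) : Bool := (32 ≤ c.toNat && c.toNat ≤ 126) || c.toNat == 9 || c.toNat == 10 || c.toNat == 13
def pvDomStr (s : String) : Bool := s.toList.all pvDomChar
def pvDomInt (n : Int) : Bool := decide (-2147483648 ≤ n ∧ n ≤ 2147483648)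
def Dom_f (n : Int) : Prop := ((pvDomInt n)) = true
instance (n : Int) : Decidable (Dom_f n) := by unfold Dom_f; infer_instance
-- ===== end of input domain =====

-- B replaces A's bulb-toggling simulation over an n-cell array by directly counting
-- the perfect squares ≤ n (bulb j ends ON iff j+1 is a perfect square).

-- ===== PORT A =====
-- s[start] = 1 - s[start]; in A, start is always a valid nonnegative index
-- (start ∈ {i-1, 2i-1, …} with start < n and i ≥ 1), so set/getD at start.toNat is exact here.
def pvTog (s : Array Int) (t : Int) : Array Int := s.set! t.toNat (1 - s.getD t.toNat 0)

-- the inner 'while start < n-i: start += i; s[start] = 1-s[start]' loop;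
-- the '0 < i' conjunct is a pure totality guard: every call has i ≥ 1 (i ∈ range(1, n+1)).
def pvInner (n i start : Int) (s : Array Int) : Array Int :=
  if _h : start < n - i ∧ 0 < i then
    pvInner n i (start + i) (pvTog s (start + i))
  else s
termination_by (n - i - start).toNat
decreasing_by omega

def f (n : Int) : Int :=
  let s0 := Array.replicate n.toNat (0 : Int)
  let s := (PySem.List.pyRange 1 (n + 1) 1).foldl (fun s i => pvInner n i (-1) s) s0
  ((PySem.List.count s.toList 1 : Nat) : Int)

-- ===== PORT B =====
-- 'while k*k <= n: k += 1'; the '1 ≤ k' conjunct is a pure totality guard (k starts at 1).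
def pvBLoop (n k : Int) : Int :=
  if h : k * k ≤ n ∧ 1 ≤ k then pvBLoop n (k + 1) else k - 1
termination_by (n + 1 - k).toNat
decreasing_by
  have hk : k ≤ k * k := le_mul_of_one_le_left (by omega) h.2
  omega

def f_alt (n : Int) : Int := pvBLoop n 1

-- ===== PRECONDITION & SPEC =====
def Spec_f (n : Int) (out : Int) : Prop := out = f_alt n
instance (n : Int) (out : Int) : Decidable (Spec_f n out) := by unfold Spec_f; infer_instance

-- ===== CLAIM (what is proved, stated in full; the proofs are below) =====
def Claim_equal_f : Prop := ∀ (n : Int), Dom_f n → Spec_f n (f n)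

-- ===== LEMMAS AND PROOFS =====

----------------------------------------------------------------
-- B side: pvBLoop computes the integer square root.
----------------------------------------------------------------

lemma sqrt_final (n k : Int) (hk : 1 ≤ k) (hprev : (k - 1) * (k - 1) ≤ n) (hstop : ¬ k * k ≤ n) :
    (k - 1 : Int) = ((Nat.sqrt n.toNat : Nat) : Int) := by
  have hn : 0 ≤ n := le_trans (mul_self_nonneg _) hprev
  set j : Nat := (k - 1).toNat with hj
  have hjk : (j : Int) = k - 1 := by omega
  have hnn : ((n.toNat : Nat) : Int) = n := by omega
  have h1 : j * j ≤ n.toNat := by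
    have h : ((j * j : Nat) : Int) ≤ ((n.toNat : Nat) : Int) := by push_cast; rw [hjk]; omega
    exact_mod_cast h
  have h2 : n.toNat < (j + 1) * (j + 1) := by
    have h : ((n.toNat : Nat) : Int) < (((j + 1) * (j + 1) : Nat) : Int) := by
      push_cast; rw [hjk]; nlinarith [hstop, hnn]
    exact_mod_cast h
  have hs : Nat.sqrt n.toNat = j := by
    refine le_antisymm ?_ (Nat.le_sqrt.2 (by nlinarith [h1]))
    have := Nat.sqrt_lt.2 h2
    omega
  rw [hs, hjk]

lemma pvBLoop_eq (n : Int) :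
    ∀ (M : Nat) (k : Int), (n + 1 - k).toNat ≤ M → 1 ≤ k → (k - 1) * (k - 1) ≤ n →
      pvBLoop n k = ((Nat.sqrt n.toNat : Nat) : Int) := by
  intro M
  induction M with
  | zero =>
    intro k hM hk hprev
    rw [pvBLoop]
    have hkk : ¬ k * k ≤ n := by
      intro hle
      have : k ≤ k * k := le_mul_of_one_le_left (by omega) hk
      omega
    rw [dif_neg (by tauto)]
    exact sqrt_final n k hk hprev hkk
  | succ M ih =>
    intro k hM hk hprev
    rw [pvBLoop]
    by_cases hkk : k * k ≤ n
    · rw [dif_pos ⟨hkk, hk⟩]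
      have hkle : k ≤ k * k := le_mul_of_one_le_left (by omega) hk
      exact ih (k + 1) (by omega) (by omega) (by simpa using hkk)
    · rw [dif_neg (by tauto)]
      exact sqrt_final n k hk hprev hkk

lemma f_alt_eq_sqrt (n : Int) (hn : 0 ≤ n) : f_alt n = ((Nat.sqrt n.toNat : Nat) : Int) :=
  pvBLoop_eq n (n + 1 - 1).toNat 1 (by omega) (by omega) (by simpa using hn)

lemma f_alt_neg (n : Int) (hn : n < 0) : f_alt n = 0 := by
  unfold f_alt
  rw [pvBLoop, dif_neg (by intro h; nlinarith [h.1])]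
  norm_num

----------------------------------------------------------------
-- A side, elementwise description of the toggling loops.
----------------------------------------------------------------

lemma pvTog_getElem? (s : Array Int) (t : Int) (ht : 0 ≤ t) (j : Nat) :
    (pvTog s t)[j]? = if (j : Int) = t then s[j]?.map (fun v => 1 - v) else s[j]? := by
  unfold pvTog
  rw [Array.set!_eq_setIfInBounds, Array.getElem?_setIfInBounds]
  by_cases hj : (j : Int) = t
  · have hjt : t.toNat = j := by omega
    rw [if_pos hjt, if_pos hj, hjt]
    by_cases hlen : j < s.size
    · rw [if_pos hlen, Array.getElem?_eq_getElem hlen]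
      simp [Array.getElem?_eq_getElem hlen]
    · rw [if_neg hlen, Array.getElem?_eq_none (by omega)]
      simp
  · rw [if_neg (show ¬ t.toNat = j by omega), if_neg hj]

-- a positive multiple of i other than i itself is at least 2i
lemma dvd_step (i d : Int) (hd : i ∣ d) (hpos : 0 < d) (hne : d ≠ i) : 2 * i ≤ d := by
  have h1 : i ≤ d := Int.le_of_dvd hpos hd
  have h2 : i ∣ d - i := dvd_sub hd (dvd_refl i)
  have h3 : i ≤ d - i := Int.le_of_dvd (by omega) h2
  omega

lemma pvInner_getElem?_aux (n i : Int) (hi : 0 < i) :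
    ∀ (M : Nat) (start : Int), (n - i - start).toNat ≤ M → -1 ≤ start → ∀ (s : Array Int) (j : Nat),
    (pvInner n i start s)[j]? =
      if start < (j : Int) ∧ (j : Int) < n ∧ i ∣ ((j : Int) - start)
      then s[j]?.map (fun v => 1 - v) else s[j]? := by
  intro M
  induction M with
  | zero =>
    intro start hM hstart s j
    rw [pvInner, dif_neg (show ¬(start < n - i ∧ 0 < i) by omega)]
    rw [if_neg]
    rintro ⟨h1, h2, h3⟩
    have hij : i ≤ (j : Int) - start := Int.le_of_dvd (by omega) h3
    omega
  | succ M ih =>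
    intro start hM hstart s j
    rw [pvInner]
    by_cases hg : start < n - i
    · rw [dif_pos ⟨hg, hi⟩]
      rw [ih (start + i) (by omega) (by omega) _ j]
      rw [pvTog_getElem? s (start + i) (by omega) j]
      by_cases hje : (j : Int) = start + i
      · rw [if_neg (by omega), if_pos hje, if_pos ⟨by omega, by omega, by rw [hje]; simp⟩]
      · rw [if_neg hje]
        by_cases hC : start + i < (j : Int) ∧ (j : Int) < n ∧ i ∣ ((j : Int) - (start + i))
        · have hdv : i ∣ (j : Int) - start := by
            have h := dvd_add hC.2.2 (dvd_refl i)
            have he : (j : Int) - (start + i) + i = (j : Int) - start := by ring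
            rwa [he] at h
          rw [if_pos hC, if_pos ⟨by omega, hC.2.1, hdv⟩]
        · rw [if_neg hC, if_neg]
          rintro ⟨h1, h2, h3⟩
          apply hC
          have hge : 2 * i ≤ (j : Int) - start := dvd_step i _ h3 (by omega) (by omega)
          refine ⟨by omega, h2, ?_⟩
          have h := dvd_sub h3 (dvd_refl i)
          have he : (j : Int) - start - i = (j : Int) - (start + i) := by ring
          rwa [he] at h
    · rw [dif_neg (show ¬(start < n - i ∧ 0 < i) by omega), if_neg]
      rintro ⟨h1, h2, h3⟩
      have hij : i ≤ (j : Int) - start := Int.le_of_dvd (by omega) h3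
      omega

lemma pvInner_getElem? (n i : Int) (hi : 0 < i) (start : Int) (hstart : -1 ≤ start)
    (s : Array Int) (j : Nat) :
    (pvInner n i start s)[j]? =
      if start < (j : Int) ∧ (j : Int) < n ∧ i ∣ ((j : Int) - start)
      then s[j]?.map (fun v => 1 - v) else s[j]? :=
  pvInner_getElem?_aux n i hi (n - i - start).toNat start le_rfl hstart s j

lemma fold_getElem? (n : Int) :
    ∀ (L : List Int), (∀ i ∈ L, 0 < i) → ∀ (s : Array Int) (j : Nat),
    ((L.foldl (fun s i => pvInner n i (-1) s) s))[j]? =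
      s[j]?.map (fun v =>
        if (j : Int) < n ∧ Odd (L.countP (fun i => decide (i ∣ ((j : Int) + 1)))) then 1 - v else v) := by
  intro L
  induction L with
  | nil =>
    intro _ s j
    simp [Nat.odd_iff]
  | cons i L ih =>
    intro hpos s j
    have hi : 0 < i := hpos i (List.mem_cons_self ..)
    rw [List.foldl_cons, ih (fun x hx => hpos x (List.mem_cons_of_mem _ hx)),
        pvInner_getElem? n i hi (-1) (by omega) s j, List.countP_cons]
    have he : (j : Int) - (-1) = (j : Int) + 1 := by ring
    rw [he]
    by_cases hjn : (j : Int) < n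
    · by_cases hdv : i ∣ ((j : Int) + 1)
      · rw [if_pos ⟨by omega, hjn, hdv⟩, Option.map_map]
        cases s[j]? with
        | none => rfl
        | some v =>
          simp only [Option.map_some, Function.comp_apply]
          have hodd : Odd (L.countP (fun i => decide (i ∣ ((j : Int) + 1))) + 1) ↔
              ¬ Odd (L.countP (fun i => decide (i ∣ ((j : Int) + 1)))) := Nat.odd_add_one
          simp only [hdv, decide_true, if_true, hjn, true_and]
          by_cases hO : Odd (L.countP (fun i => decide (i ∣ ((j : Int) + 1))))
          · rw [if_pos hO, if_neg (by rw [hodd]; tauto)]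
            congr 1; ring
          · rw [if_neg hO, if_pos (hodd.mpr hO)]
      · rw [if_neg (by tauto)]
        simp [hdv]
    · rw [if_neg (by tauto)]
      cases s[j]? <;> simp [hjn]

----------------------------------------------------------------
-- number theory: a positive m has an odd number of divisors iff it is a square
----------------------------------------------------------------

lemma odd_card_divisors_iff (m : ℕ) (hm : 0 < m) :
    Odd (Nat.divisors m).card ↔ Nat.sqrt m * Nat.sqrt m = m := by
  classical
  set D := Nat.divisors m with hD
  set L := D.filter (fun d => d * d < m) with hL
  set H := D.filter (fun d => m < d * d) with hH
  set E := D.filter (fun d => d * d = m) with hE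
  have hsplit1 : (D.filter (fun d => d * d < m)).card + (D.filter (fun d => ¬ d * d < m)).card = D.card :=
    Finset.card_filter_add_card_filter_not _
  have hsplit2 : ((D.filter (fun d => ¬ d * d < m)).filter (fun d => d * d = m)).card
      + ((D.filter (fun d => ¬ d * d < m)).filter (fun d => ¬ d * d = m)).card
      = (D.filter (fun d => ¬ d * d < m)).card :=
    Finset.card_filter_add_card_filter_not _
  have hEeq : (D.filter (fun d => ¬ d * d < m)).filter (fun d => d * d = m) = E := by
    rw [hE, Finset.filter_filter]
    apply Finset.filter_congr
    intro d _
    generalize d * d = x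
    omega
  have hHeq : (D.filter (fun d => ¬ d * d < m)).filter (fun d => ¬ d * d = m) = H := by
    rw [hH, Finset.filter_filter]
    apply Finset.filter_congr
    intro d _
    generalize d * d = x
    omega
  have hLH : L.card = H.card := by
    apply Finset.card_bij' (fun d _ => m / d) (fun d _ => m / d)
    · intro d hd
      rw [hL, Finset.mem_filter, Nat.mem_divisors] at hd
      obtain ⟨⟨hdvd, hm0⟩, hlt⟩ := hd
      have hdpos : 0 < d := Nat.pos_of_dvd_of_pos hdvd hm
      obtain ⟨e, he⟩ := hdvd
      have heq : m / d = e := by rw [he]; exact Nat.mul_div_cancel_left e hdpos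
      have hepos : 0 < e := by
        rcases Nat.eq_zero_or_pos e with h0 | h
        · subst h0; simp at he; omega
        · exact h
      have hde : d < e := Nat.lt_of_mul_lt_mul_left (a := d) (by rw [← he]; exact hlt)
      rw [hH, Finset.mem_filter, Nat.mem_divisors, heq]
      refine ⟨⟨⟨d, by rw [he]; ring⟩, hm0⟩, ?_⟩
      nlinarith [hde, hepos, he]
    · intro d hd
      rw [hH, Finset.mem_filter, Nat.mem_divisors] at hd
      obtain ⟨⟨hdvd, hm0⟩, hlt⟩ := hd
      have hdpos : 0 < d := Nat.pos_of_dvd_of_pos hdvd hm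
      obtain ⟨e, he⟩ := hdvd
      have heq : m / d = e := by rw [he]; exact Nat.mul_div_cancel_left e hdpos
      have hepos : 0 < e := by
        rcases Nat.eq_zero_or_pos e with h0 | h
        · subst h0; simp at he; omega
        · exact h
      have hed : e < d := Nat.lt_of_mul_lt_mul_left (a := d) (by rw [← he]; omega)
      rw [hL, Finset.mem_filter, Nat.mem_divisors, heq]
      refine ⟨⟨⟨d, by rw [he]; ring⟩, hm0⟩, ?_⟩
      nlinarith [hed, hepos, he]
    · intro d hd
      rw [hL, Finset.mem_filter, Nat.mem_divisors] at hd
      exact Nat.div_div_self hd.1.1 (by omega)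
    · intro d hd
      rw [hH, Finset.mem_filter, Nat.mem_divisors] at hd
      exact Nat.div_div_self hd.1.1 (by omega)
  have hE1 : ((D.filter (fun d => ¬ d * d < m)).filter (fun d => d * d = m)).card = E.card := by
    rw [hEeq]
  have hH1 : ((D.filter (fun d => ¬ d * d < m)).filter (fun d => ¬ d * d = m)).card = H.card := by
    rw [hHeq]
  have hL1 : (D.filter (fun d => d * d < m)).card = L.card := rfl
  have hcard : D.card = 2 * L.card + E.card := by omega
  by_cases hsq : Nat.sqrt m * Nat.sqrt m = m
  · have hEone : E = {Nat.sqrt m} := by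
      apply Finset.ext
      intro d
      rw [hE, Finset.mem_filter, Nat.mem_divisors, Finset.mem_singleton]
      constructor
      · rintro ⟨_, hdd⟩
        rw [← hdd, Nat.sqrt_eq]
      · rintro rfl
        exact ⟨⟨⟨Nat.sqrt m, hsq.symm⟩, by omega⟩, hsq⟩
    rw [hcard, hEone, Finset.card_singleton]
    constructor
    · intro _; exact hsq
    · intro _; rw [Nat.odd_iff]; omega
  · have hEnone : E = ∅ := by
      apply Finset.eq_empty_of_forall_notMem
      intro d hd
      rw [hE, Finset.mem_filter] at hd
      have hde : Nat.sqrt m = d := by rw [← hd.2, Nat.sqrt_eq]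
      exact hsq (by rw [hde, hd.2])
    rw [hcard, hEnone, Finset.card_empty]
    constructor
    · intro h; rw [Nat.odd_iff] at h; omega
    · intro h; exact absurd h hsq

lemma sqrt_succ (N : ℕ) :
    Nat.sqrt (N + 1) = Nat.sqrt N + (if Nat.sqrt (N + 1) * Nat.sqrt (N + 1) = N + 1 then 1 else 0) := by
  by_cases hsq : Nat.sqrt (N + 1) * Nat.sqrt (N + 1) = N + 1
  · rw [if_pos hsq]
    set k := Nat.sqrt (N + 1) with hk
    have hk1 : 1 ≤ k := by
      by_contra h
      have : k = 0 := by omega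
      rw [this] at hsq; omega
    obtain ⟨j, hkj⟩ : ∃ j, k = j + 1 := ⟨k - 1, by omega⟩
    have hexp : k * k = j * j + 2 * j + 1 := by rw [hkj]; ring
    have h1 : (k - 1) * (k - 1) ≤ N := by
      have : (k - 1) = j := by omega
      rw [this]
      omega
    have h2 : N < k * k := by omega
    have : Nat.sqrt N = k - 1 := by
      refine le_antisymm ?_ (Nat.le_sqrt.2 h1)
      have := Nat.sqrt_lt.2 h2
      omega
    omega
  · rw [if_neg hsq]
    have hle : Nat.sqrt N ≤ Nat.sqrt (N + 1) := Nat.sqrt_le_sqrt (by omega)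
    have hge : Nat.sqrt (N + 1) ≤ Nat.sqrt N := by
      apply Nat.le_sqrt.2
      have h1 : Nat.sqrt (N + 1) * Nat.sqrt (N + 1) ≤ N + 1 := Nat.sqrt_le (N + 1)
      omega
    omega

lemma countP_squares (N : ℕ) :
    (List.range N).countP (fun j => decide (Nat.sqrt (j + 1) * Nat.sqrt (j + 1) = j + 1)) = Nat.sqrt N := by
  induction N with
  | zero => simp
  | succ N ih =>
    rw [List.range_succ, List.countP_append, ih]
    simp only [List.countP_cons, List.countP_nil, Nat.zero_add]
    by_cases hsq : Nat.sqrt (N + 1) * Nat.sqrt (N + 1) = N + 1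
    · have hk : Nat.sqrt (N + 1) = Nat.sqrt N + 1 := by rw [sqrt_succ N, if_pos hsq]
      rw [hk] at hsq ⊢
      simp [hsq]
    · have hk : Nat.sqrt (N + 1) = Nat.sqrt N := by rw [sqrt_succ N, if_neg hsq]; omega
      rw [hk] at hsq ⊢
      simp [hsq]

----------------------------------------------------------------
-- assembly
----------------------------------------------------------------

-- bridge: a countP over List.range is the card of the corresponding filtered Finset.range
lemma countP_range_card (N : ℕ) (p : ℕ → Bool) :
    (List.range N).countP p = ((Finset.range N).filter (fun i => p i)).card := by
  simp [Finset.range, Finset.filter, Multiset.filter, List.countP_eq_length_filter, Multiset.range]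

-- number of k < N with (k+1) ∣ m is the number of divisors of m, for 1 ≤ m ≤ N
lemma countP_range_divisors (m N : ℕ) (h1 : 1 ≤ m) (h2 : m ≤ N) :
    (List.range N).countP (fun k => decide ((k + 1) ∣ m)) = (Nat.divisors m).card := by
  rw [countP_range_card]
  refine Finset.card_bij' (fun k _ => k + 1) (fun d _ => d - 1) ?hi ?hj ?li ?ri
  case hi =>
    intro k hk
    rw [Finset.mem_filter, Finset.mem_range] at hk
    rw [Nat.mem_divisors]
    exact ⟨by simpa using hk.2, by omega⟩
  case hj =>
    intro d hd
    dsimp only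
    rw [Nat.mem_divisors] at hd
    have hdpos : 0 < d := Nat.pos_of_dvd_of_pos hd.1 (by omega)
    have hdle : d ≤ m := Nat.le_of_dvd (by omega) hd.1
    rw [Finset.mem_filter, Finset.mem_range]
    refine ⟨by omega, ?_⟩
    simpa [Nat.sub_add_cancel hdpos] using hd.1
  case li => intro k _; dsimp only; omega
  case ri =>
    intro d hd
    rw [Nat.mem_divisors] at hd
    have hdpos : 0 < d := Nat.pos_of_dvd_of_pos hd.1 (by omega)
    dsimp only
    omega

-- the per-cell toggle count of A equals the divisor count of j+1 (for j < n)
lemma cnt_eq_card_divisors (n : Int) (hn : 0 ≤ n) (j : Nat) (hj : (j : Int) < n) :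
    (PySem.List.pyRange 1 (n + 1) 1).countP (fun i => decide (i ∣ ((j : Int) + 1)))
      = (Nat.divisors (j + 1)).card := by
  rw [PySem.List.pyRange_one, List.countP_map]
  have he : (n + 1 - 1).toNat = n.toNat := by omega
  rw [he]
  have hcong : ∀ k ∈ List.range n.toNat,
      (((fun i => decide (i ∣ ((j : Int) + 1))) ∘ (fun k : Nat => (1 : Int) + k)) k = true)
        ↔ ((fun k => decide ((k + 1) ∣ (j + 1))) k = true) := by
    intro k _
    simp only [Function.comp_apply, decide_eq_true_eq]
    have hcast : ((k + 1 : Nat) : Int) = 1 + (k : Int) := by push_cast; ring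
    have hcast2 : ((j + 1 : Nat) : Int) = (j : Int) + 1 := by push_cast; ring
    rw [← hcast, ← hcast2]
    exact Int.natCast_dvd_natCast
  rw [List.countP_congr hcong]
  exact countP_range_divisors (j + 1) n.toNat (by omega) (by omega)

-- the final array of A, in closed form
lemma final_list_eq (n : Int) (hn : 0 ≤ n) :
    ((PySem.List.pyRange 1 (n + 1) 1).foldl (fun s i => pvInner n i (-1) s)
        (Array.replicate n.toNat (0 : Int))).toList
      = (List.range n.toNat).map (fun j =>
          if Odd ((Nat.divisors (j + 1)).card) then (1 : Int) else 0) := by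
  apply List.ext_getElem?
  intro j
  rw [Array.getElem?_toList]
  rw [fold_getElem? n _ (fun i hi => by
        rw [PySem.List.mem_pyRange_one] at hi; omega)]
  by_cases hj : j < n.toNat
  · rw [Array.getElem?_replicate, if_pos hj, List.getElem?_map,
        List.getElem?_range hj]
    have hjn : (j : Int) < n := by omega
    rw [cnt_eq_card_divisors n hn j hjn]
    simp only [Option.map_some, hjn, true_and]
    by_cases hO : Odd ((Nat.divisors (j + 1)).card) <;> simp [hO]
  · rw [Array.getElem?_replicate, if_neg hj, List.getElem?_map,
        List.getElem?_eq_none (by simpa using by omega : (List.range n.toNat).length ≤ j)]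
    rfl

lemma f_eq_sqrt (n : Int) (hn : 0 ≤ n) : f n = ((Nat.sqrt n.toNat : Nat) : Int) := by
  show ((PySem.List.count _ 1 : Nat) : Int) = _
  rw [PySem.List.count_eq, final_list_eq n hn]
  congr 1
  rw [List.count_eq_countP, List.countP_map]
  have hc : ∀ j ∈ List.range n.toNat,
      (((fun x : Int => x == 1) ∘ (fun j : Nat =>
        if Odd ((Nat.divisors (j + 1)).card) then (1 : Int) else 0)) j = true)
        ↔ ((fun j => decide (Nat.sqrt (j + 1) * Nat.sqrt (j + 1) = j + 1)) j = true) := by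
    intro j _
    have hiff := odd_card_divisors_iff (j + 1) (by omega)
    by_cases hO : Odd ((Nat.divisors (j + 1)).card)
    · simp [hO, hiff.mp hO]
    · have : ¬ Nat.sqrt (j + 1) * Nat.sqrt (j + 1) = j + 1 := fun h => hO (hiff.mpr h)
      simp [hO, this]
  rw [List.countP_congr hc, countP_squares]

-- ===== VERDICT (by name: the statement is the Claim_ definition above) =====
theorem f_spec : Claim_equal_f := by
  intro n _
  unfold Spec_f
  rcases le_or_gt 0 n with hn | hn
  · rw [f_eq_sqrt n hn, f_alt_eq_sqrt n hn]
  · rw [f_alt_neg n hn]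
    show ((PySem.List.count _ 1 : Nat) : Int) = 0
    rw [PySem.List.pyRange_one_eq_nil (by omega)]
    have : n.toNat = 0 := by omega
    simp [this, PySem.List.count_eq]
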